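-- pv_equiv track=rewrite | github.com/pypi-data/pypi-mirror-401 | packages/regression-monkey/regression_monkey-0.1.1.tar.gz/regression_monkey-0.1.1/src/reg_monkey/baseline_spec.py | lockstep_zip
-- ===== SOURCE A (Python) =====
-- from typing import List, Dict, Any, Iterable, Optional, Tuple, Callable
--
-- def lockstep_zip(dict_lists: Dict[str, List[str]]) -> Iterable[Dict[str, str]]:
--     """锁步组合：按索引对齐，如 {A:[A1,A2], B:[B1,B2]} -> {A:A1,B:B1}, {A:A2,B:B2}
--     若长度不等，采用最短长度对齐。"""
--     if not dict_lists:
--         yield {}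
--         return
--     keys = list(dict_lists.keys())
--     min_len = min(len(v) for v in dict_lists.values())
--     for i in range(min_len):
--         yield {k: dict_lists[k][i] for k in keys}
-- ===== SOURCE B (Python) =====
-- def lockstep_zip(dict_lists):
--     if not dict_lists:
--         yield {}
--         return
--     rows = None
--     for k, vs in dict_lists.items():
--         if rows is None:
--             rows = [{k: v} for v in vs]
--         else:
--             del rows[len(vs):]
--             for row, v in zip(rows, vs):
--                 row[k] = v
--     yield from rows
-- ===== Notes on version B (the rewrite author's own statement) =====
-- stated objective: alternative
-- what changed: Instead of computing the minimum length and looping over row indices, B makes a single key-outer pass that builds a list of row-dict accumulators from the first value list and, for each later key, truncates the row list to that list's length and writes the key's values into the surviving rows.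
import Mathlib
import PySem

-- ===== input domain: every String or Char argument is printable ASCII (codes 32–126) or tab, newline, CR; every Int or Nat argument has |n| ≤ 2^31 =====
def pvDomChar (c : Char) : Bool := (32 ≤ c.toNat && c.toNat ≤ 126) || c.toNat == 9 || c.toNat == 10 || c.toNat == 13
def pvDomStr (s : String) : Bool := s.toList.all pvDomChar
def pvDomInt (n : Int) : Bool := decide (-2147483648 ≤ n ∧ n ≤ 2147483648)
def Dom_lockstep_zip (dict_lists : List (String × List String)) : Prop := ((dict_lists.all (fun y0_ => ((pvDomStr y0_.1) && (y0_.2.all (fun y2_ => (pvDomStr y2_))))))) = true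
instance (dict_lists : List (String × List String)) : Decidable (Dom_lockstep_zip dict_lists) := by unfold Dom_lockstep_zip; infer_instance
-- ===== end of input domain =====

-- B replaces A's min-length + index loop by a single key-outer pass that fills and
-- truncates a list of row accumulators (alternative decomposition; same cost).

-- ===== PORT A =====
-- A: if not dict_lists: yield {}; keys; min_len = min(len(v) for v in values); for i in range(min_len): {k: dict_lists[k][i]}
def lockstep_zip (dict_lists : List (String × List String)) : List (List (String × String)) :=
  if dict_lists = [] then [[]]
  else
    let d := PySem.Dict.mk dict_lists
    let keys := d.keys
    let min_len : Nat :=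
      match d.values.map List.length with
      | [] => 0            -- unreachable: dict_lists ≠ []
      | x :: xs => xs.foldl min x
    -- i < min_len ≤ len(dict_lists[k]) for every key under Pre_, so getD is exact here
    (List.range min_len).map (fun i => keys.map (fun k => (k, (d.getD k []).getD i "")))

-- ===== PORT B =====
-- one step of B's loop over (k, vs): first key seeds the rows, later keys truncate
-- rows to len(vs) and append (k, vs[i]) to row i (row[k] = v appends: k is a fresh
-- key of each row, since a dict's keys are distinct)
def rowStep (rows : Option (List (List (String × String)))) (kv : String × List String) :
    Option (List (List (String × String))) :=
  match rows with
  | none => some (kv.2.map (fun v => [(kv.1, v)]))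
  | some rs => some (((rs.take kv.2.length).zip kv.2).map (fun rv => rv.1 ++ [(kv.1, rv.2)]))

def lockstep_zip_alt (dict_lists : List (String × List String)) : List (List (String × String)) :=
  if dict_lists = [] then [[]]
  else
    let d := PySem.Dict.mk dict_lists
    (d.items.foldl rowStep none).getD []

-- ===== PRECONDITION & SPEC =====
-- Pre_ requires the association list to have pairwise-distinct keys, which is automatic
-- for a Python dict argument: it excludes no input the Python A actually receives.
def Pre_lockstep_zip (dict_lists : List (String × List String)) : Prop :=
  (dict_lists.map Prod.fst).Nodup
instance (dict_lists : List (String × List String)) : Decidable (Pre_lockstep_zip dict_lists) := by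
  unfold Pre_lockstep_zip; infer_instance

def pvWitness_lockstep_zip : (List (String × List String)) :=
  [("a", ["1", "2"]), ("b", ["x"])]

def Spec_lockstep_zip (dict_lists : List (String × List String)) (out : List (List (String × String))) : Prop := out = lockstep_zip_alt dict_lists
instance (dict_lists : List (String × List String)) (out : List (List (String × String))) : Decidable (Spec_lockstep_zip dict_lists out) := by unfold Spec_lockstep_zip; infer_instance

-- ===== CLAIM =====
def Claim_equal_lockstep_zip : Prop := ∀ (dict_lists : List (String × List String)), Dom_lockstep_zip dict_lists → Pre_lockstep_zip dict_lists → Spec_lockstep_zip dict_lists (lockstep_zip dict_lists)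

-- ===== LEMMAS AND PROOFS =====

lemma foldl_min_le (ps : List (String × List String)) : ∀ n : Nat,
    ps.foldl (fun a p => min a p.2.length) n ≤ n := by
  induction ps with
  | nil => intro n; exact le_refl n
  | cons p ps ih =>
    intro n
    exact le_trans (ih _) (Nat.min_le_left _ _)

lemma rows_self (rs : List (List (String × String))) :
    rs = (List.range rs.length).map (fun i => rs.getD i [] ++ []) := by
  apply List.ext_getElem
  · simp
  · intro i h1 h2
    simp only [List.getElem_map, List.getElem_range, List.append_nil]
    rw [List.getD_eq_getElem rs [] (by simpa using h2)]

-- loop invariant: folding B's step over ps from row list rs yields, for each index i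
-- below the running minimum, row rs[i] extended by one (key, value) pair per element of ps
lemma foldl_rowStep (ps : List (String × List String)) :
    ∀ rs : List (List (String × String)),
    ps.foldl rowStep (some rs) =
      some ((List.range (ps.foldl (fun a p => min a p.2.length) rs.length)).map
        (fun i => rs.getD i [] ++ ps.map (fun p => (p.1, p.2.getD i "")))) := by
  induction ps with
  | nil =>
    intro rs
    simp only [List.foldl_nil, List.map_nil]
    exact congrArg some (rows_self rs)
  | cons p ps ih =>
    intro rs
    simp only [List.foldl_cons]
    have hstep : rowStep (some rs) p =
        some (((rs.take p.2.length).zip p.2).map (fun rv => rv.1 ++ [(p.1, rv.2)])) := rfl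
    rw [hstep, ih]
    congr 1
    have hlen : (((rs.take p.2.length).zip p.2).map (fun rv => rv.1 ++ [(p.1, rv.2)])).length
        = min rs.length p.2.length := by simp; exact Nat.min_comm _ _
    rw [hlen]
    apply List.map_congr_left
    intro i hi
    have hm : i < min rs.length p.2.length := by
      have := List.mem_range.mp hi
      exact lt_of_lt_of_le this (foldl_min_le ps _)
    have h1 : i < rs.length := lt_of_lt_of_le hm (Nat.min_le_left _ _)
    have h2 : i < p.2.length := lt_of_lt_of_le hm (Nat.min_le_right _ _)
    have hlen2 : i < (((rs.take p.2.length).zip p.2).map (fun rv => rv.1 ++ [(p.1, rv.2)])).length := by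
      rw [hlen]; exact hm
    rw [List.getD_eq_getElem _ [] hlen2, List.getD_eq_getElem rs [] h1]
    simp only [List.getElem_map, List.getElem_zip, List.getElem_take, List.map_cons]
    rw [List.getD_eq_getElem p.2 "" h2]
    simp

lemma getD_of_mem (dl : List (String × List String)) (hnd : (dl.map Prod.fst).Nodup)
    (p : String × List String) (hp : p ∈ dl) :
    (PySem.Dict.mk dl).getD p.1 [] = p.2 := by
  apply PySem.Dict.getD_of_mem_items (d := PySem.Dict.mk dl) (k := p.1) (v := p.2)
  · exact hp
  · exact hnd

lemma keys_eq (dl : List (String × List String)) :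
    (PySem.Dict.mk dl).keys = dl.map Prod.fst := rfl

lemma values_eq (dl : List (String × List String)) :
    (PySem.Dict.mk dl).values = dl.map Prod.snd := rfl

-- ===== VERDICT =====
theorem lockstep_zip_spec : Claim_equal_lockstep_zip := by
  intro dl _ hpre
  unfold Spec_lockstep_zip lockstep_zip lockstep_zip_alt
  cases dl with
  | nil => simp
  | cons p ps =>
    simp only [reduceCtorEq, if_false]
    have hpre' : ((p :: ps).map Prod.fst).Nodup := hpre
    -- evaluate B's fold: the first item seeds the rows
    have hfirst : rowStep none p = some (p.2.map (fun v => [(p.1, v)])) := rfl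
    rw [List.foldl_cons, hfirst, foldl_rowStep]
    simp only [Option.getD_some, List.length_map]
    -- A's min_len equals B's running minimum
    have hmin : (match ((PySem.Dict.mk (p :: ps)).values.map List.length) with
        | [] => 0
        | x :: xs => xs.foldl min x)
        = ps.foldl (fun a q => min a q.2.length) p.2.length := by
      rw [values_eq]
      simp only [List.map_cons, List.map_map]
      rw [List.foldl_map]
      rfl
    rw [hmin]
    apply List.map_congr_left
    intro i hi
    have him : i < ps.foldl (fun a q => min a q.2.length) p.2.length := List.mem_range.mp hi
    have hip : i < p.2.length := lt_of_lt_of_le him (foldl_min_le ps _)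
    -- the seeded row i is [(p.1, p.2[i])]
    have hrow : (p.2.map (fun v => [(p.1, v)])).getD i [] = [(p.1, p.2.getD i "")] := by
      rw [List.getD_eq_getElem _ [] (by simpa using hip), List.getD_eq_getElem p.2 "" hip]
      simp
    rw [keys_eq, List.map_map, hrow]
    have : ((p :: ps).map (fun q => ((Prod.fst q), ((PySem.Dict.mk (p :: ps)).getD q.1 []).getD i "")))
        = (p.1, p.2.getD i "") :: ps.map (fun q => (q.1, q.2.getD i "")) := by
      simp only [List.map_cons]
      congr 1
      · rw [getD_of_mem _ hpre' p (List.mem_cons_self)]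
      · apply List.map_congr_left
        intro q hq
        rw [getD_of_mem _ hpre' q (List.mem_cons_of_mem _ hq)]
    calc List.map ((fun k => (k, ((PySem.Dict.mk (p :: ps)).getD k []).getD i "")) ∘ Prod.fst) (p :: ps)
        = List.map (fun q => (q.1, ((PySem.Dict.mk (p :: ps)).getD q.1 []).getD i "")) (p :: ps) := by
          apply List.map_congr_left; intro q _; rfl
      _ = [(p.1, p.2.getD i "")] ++ ps.map (fun q => (q.1, q.2.getD i "")) := by
          rw [this]; rfl
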